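-- pv_equiv track=rewrite | github.com/NgaLe02/PYTHON_PTIT | PY01041.py | check
-- ===== SOURCE A (Python) =====
-- def check(n):
--     dem = 0
--     r = n % 10
--     n = int(n / 10)
--     ok = 0
--     while n > 0:
--         dem += 1
--         l = n % 10
--         if ok == 0 and l < r:
--             ok = 1
--         elif ok == 0 and l == r:
--             return 0
--         elif ok == 1 and l >= r:
--             return 0
--         r = l
--         n = int(n / 10)
--     if dem >= 3:
--         return 1
--     else:
--         return 0
-- ===== SOURCE B (Python) =====
-- def check(n):
--     # Collect the digits of n (least significant first) with the same arithmetic as A.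
--     digits = []
--     while n > 0:
--         digits.append(n % 10)
--         n = int(n / 10)
--     if len(digits) < 4:
--         return 0
--     # Strict mountain check: climb strictly while it rises, then descend strictly;
--     # the number qualifies iff the descent consumes the remaining digits.
--     prev, rest = digits[0], digits[1:]
--     while rest and rest[0] > prev:
--         prev, rest = rest[0], rest[1:]
--     while rest and rest[0] < prev:
--         prev, rest = rest[0], rest[1:]
--     return 1 if not rest else 0
-- ===== Notes on version B (the rewrite author's own statement) =====
-- stated objective: alternative
-- what changed: A's single-pass state machine (ok flag, early returns while peeling digits off n) is replaced by collecting the digit list first and then running a separate two-phase rise-then-fall scan that must consume the whole list.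
import Mathlib
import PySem

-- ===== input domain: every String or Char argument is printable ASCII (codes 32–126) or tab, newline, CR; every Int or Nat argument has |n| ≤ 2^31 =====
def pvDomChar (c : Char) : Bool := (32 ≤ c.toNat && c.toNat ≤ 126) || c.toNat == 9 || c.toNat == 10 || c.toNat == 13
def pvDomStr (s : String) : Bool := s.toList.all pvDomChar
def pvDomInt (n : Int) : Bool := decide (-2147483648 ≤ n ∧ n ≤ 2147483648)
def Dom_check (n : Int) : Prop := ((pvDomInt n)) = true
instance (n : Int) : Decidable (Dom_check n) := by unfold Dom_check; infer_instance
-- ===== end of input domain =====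

-- B collects the digits first and then runs a plain two-phase (rise-then-fall) scan instead of
-- A's one-pass state machine over n; same cost, clearer decomposition (objective: alternative).
-- Python's int(n/10) is ported as floor division: exact for 0 ≤ n on Dom (the quotient is
-- float-exact up to 2^31), and for n ≤ 0 the loop is never entered under either rounding.

-- ===== PORT A =====
def checkLoop (dem r n ok : Int) : Int :=
  if h : n > 0 then
    let dem := dem + 1
    let l := PySem.Int.mod n 10
    if ok = 0 ∧ l < r then
      checkLoop dem l (PySem.Int.floordiv n 10) 1
    else if ok = 0 ∧ l = r then 0
    else if ok = 1 ∧ l ≥ r then 0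
    else checkLoop dem l (PySem.Int.floordiv n 10) ok
  else
    if dem ≥ 3 then 1 else 0
termination_by n.toNat
decreasing_by
  all_goals
    have hd : PySem.Int.floordiv n 10 = n / 10 := PySem.Int.floordiv_eq_ediv_of_pos (by omega)
    rw [hd]; omega

def check (n : Int) : Int :=
  checkLoop 0 (PySem.Int.mod n 10) (PySem.Int.floordiv n 10) 0

-- ===== PORT B =====
-- digits-collection loop of Source B (append = acc ++ [·], least significant digit first)
def digitsLoop (n : Int) (acc : List Int) : List Int :=
  if _h : n > 0 then
    digitsLoop (PySem.Int.floordiv n 10) (acc ++ [PySem.Int.mod n 10])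
  else acc
termination_by n.toNat
decreasing_by
  have hd : PySem.Int.floordiv n 10 = n / 10 := PySem.Int.floordiv_eq_ediv_of_pos (by omega)
  rw [hd]; omega

-- first while loop of Source B: advance (prev, rest) while rest[0] > prev
def upPhase (prev : Int) (rest : List Int) : Int × List Int :=
  match rest with
  | x :: xs => if x > prev then upPhase x xs else (prev, rest)
  | [] => (prev, rest)

-- second while loop of Source B: advance (prev, rest) while rest[0] < prev
def downPhase (prev : Int) (rest : List Int) : Int × List Int :=
  match rest with
  | x :: xs => if x < prev then downPhase x xs else (prev, rest)
  | [] => (prev, rest)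

def check_alt (n : Int) : Int :=
  let digits := digitsLoop n []
  if digits.length < 4 then 0
  else
    match digits with
    | [] => 0   -- unreachable: length ≥ 4
    | d :: ds =>
      let p := upPhase d ds
      let q := downPhase p.1 p.2
      if q.2 = [] then 1 else 0

-- ===== PRECONDITION & SPEC =====
def Spec_check (n : Int) (out : Int) : Prop := out = check_alt n
instance (n : Int) (out : Int) : Decidable (Spec_check n out) := by unfold Spec_check; infer_instance

-- ===== CLAIM (what is proved, stated in full; the proofs are below) =====
def Claim_equal_check : Prop := ∀ (n : Int), Dom_check n → Spec_check n (check n)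

-- ===== LEMMAS AND PROOFS =====

-- the digit list of n, least significant digit first
def pydigits (n : Int) : List Int :=
  if _h : n > 0 then PySem.Int.mod n 10 :: pydigits (PySem.Int.floordiv n 10) else []
termination_by n.toNat
decreasing_by
  have hd : PySem.Int.floordiv n 10 = n / 10 := PySem.Int.floordiv_eq_ediv_of_pos (by omega)
  rw [hd]; omega

-- ds is strictly decreasing, starting below r
def down (r : Int) : List Int → Bool
  | [] => true
  | x :: xs => (x < r) && down x xs

-- ds rises strictly above r for a while, then (optionally) falls strictly, no equal neighbours
def mnt (r : Int) : List Int → Bool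
  | [] => true
  | x :: xs => if x > r then mnt x xs else if x < r then down x xs else false

theorem ite_int_cong {A B : Prop} [Decidable A] [Decidable B] (h : A ↔ B) :
    (if A then (1 : Int) else 0) = if B then 1 else 0 := by
  simp [h]

theorem digitsLoop_eq (n : Int) (acc : List Int) : digitsLoop n acc = acc ++ pydigits n := by
  induction n, acc using digitsLoop.induct with
  | case1 n acc h ih => rw [digitsLoop, pydigits]; simp only [h, dif_pos]; rw [ih]; simp
  | case2 n acc h => rw [digitsLoop, pydigits]; simp [h]

theorem downPhase_empty (r : Int) (ds : List Int) :
    ((downPhase r ds).2 = []) = (down r ds = true) := by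
  induction ds generalizing r with
  | nil => simp [downPhase, down]
  | cons x xs ih =>
    by_cases h : x < r <;> simp [downPhase, down, h, ih]

theorem phases_empty (r : Int) (ds : List Int) :
    ((downPhase (upPhase r ds).1 (upPhase r ds).2).2 = []) = (mnt r ds = true) := by
  induction ds generalizing r with
  | nil => simp [upPhase, downPhase, mnt]
  | cons x xs ih =>
    by_cases h : x > r
    · simp [upPhase, h, ih, mnt]
    · by_cases h2 : x < r <;>
        simp [upPhase, mnt, h, h2, downPhase, downPhase_empty]

theorem checkLoop_char (n : Int) (dem r : Int) :
    (checkLoop dem r n 0 =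
      if mnt r (pydigits n) = true ∧ dem + ((pydigits n).length : Int) ≥ 3 then 1 else 0) ∧
    (checkLoop dem r n 1 =
      if down r (pydigits n) = true ∧ dem + ((pydigits n).length : Int) ≥ 3 then 1 else 0) := by
  induction n using pydigits.induct generalizing dem r with
  | case1 n h ih =>
    rw [pydigits]; simp only [h, dif_pos]
    constructor
    · rw [checkLoop]; simp only [h, dif_pos]
      by_cases h1 : PySem.Int.mod n 10 < r
      · rw [if_pos ⟨trivial, h1⟩, (ih (dem + 1) (PySem.Int.mod n 10)).2]
        apply ite_int_cong
        have hm : mnt r (PySem.Int.mod n 10 :: pydigits (PySem.Int.floordiv n 10))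
            = down (PySem.Int.mod n 10) (pydigits (PySem.Int.floordiv n 10)) := by
          simp only [mnt]; rw [if_neg (by omega), if_pos h1]
        rw [hm]
        simp only [List.length_cons]
        constructor <;> rintro ⟨a, b⟩ <;> exact ⟨a, by push_cast at b ⊢; omega⟩
      · rw [if_neg (by rintro ⟨-, hb⟩; omega)]
        by_cases h2 : PySem.Int.mod n 10 = r
        · rw [if_pos ⟨trivial, h2⟩]
          have hm : mnt r (PySem.Int.mod n 10 :: pydigits (PySem.Int.floordiv n 10)) = false := by
            simp only [mnt]; rw [if_neg (by omega), if_neg (by omega)]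
          rw [hm]; simp
        · rw [if_neg (by rintro ⟨-, hb⟩; omega), if_neg (by rintro ⟨hb, -⟩; norm_num at hb),
            (ih (dem + 1) (PySem.Int.mod n 10)).1]
          apply ite_int_cong
          have hm : mnt r (PySem.Int.mod n 10 :: pydigits (PySem.Int.floordiv n 10))
              = mnt (PySem.Int.mod n 10) (pydigits (PySem.Int.floordiv n 10)) := by
            simp only [mnt]; rw [if_pos (by omega)]
          rw [hm]
          simp only [List.length_cons]
          constructor <;> rintro ⟨a, b⟩ <;> exact ⟨a, by push_cast at b ⊢; omega⟩
    · rw [checkLoop]; simp only [h, dif_pos]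
      rw [if_neg (by rintro ⟨hb, -⟩; norm_num at hb), if_neg (by rintro ⟨hb, -⟩; norm_num at hb)]
      by_cases h1 : PySem.Int.mod n 10 ≥ r
      · rw [if_pos ⟨trivial, h1⟩]
        have hm : down r (PySem.Int.mod n 10 :: pydigits (PySem.Int.floordiv n 10)) = false := by
          simp only [down]; rw [decide_eq_false (by omega)]; simp
        rw [hm]; simp
      · rw [if_neg (by rintro ⟨-, hb⟩; omega), (ih (dem + 1) (PySem.Int.mod n 10)).2]
        apply ite_int_cong
        have hm : down r (PySem.Int.mod n 10 :: pydigits (PySem.Int.floordiv n 10))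
            = down (PySem.Int.mod n 10) (pydigits (PySem.Int.floordiv n 10)) := by
          simp only [down]; rw [decide_eq_true (by omega : PySem.Int.mod n 10 < r)]; simp
        rw [hm]
        simp only [List.length_cons]
        constructor <;> rintro ⟨a, b⟩ <;> exact ⟨a, by push_cast at b ⊢; omega⟩
  | case2 n h =>
    rw [pydigits]; simp only [h, dif_neg, not_false_iff]
    rw [checkLoop, checkLoop]
    refine ⟨?_, ?_⟩ <;> simp [h, mnt, down]

-- ===== VERDICT =====
theorem check_spec : Claim_equal_check := by
  intro n _
  unfold Spec_check check check_alt
  rw [digitsLoop_eq]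
  simp only [List.nil_append]
  by_cases h : n > 0
  · rw [pydigits]
    simp only [h, dif_pos]
    rw [(checkLoop_char (PySem.Int.floordiv n 10) 0 (PySem.Int.mod n 10)).1]
    simp only [List.length_cons, phases_empty]
    by_cases h4 : (pydigits (PySem.Int.floordiv n 10)).length + 1 < 4
    · rw [if_neg (by rintro ⟨-, hb⟩; omega), if_pos h4]
    · rw [if_neg h4]
      by_cases hm : mnt (PySem.Int.mod n 10) (pydigits (PySem.Int.floordiv n 10)) = true
      · rw [if_pos ⟨hm, by omega⟩, if_pos hm]
      · rw [if_neg (by rintro ⟨a, -⟩; exact hm a), if_neg hm]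
  · have hd : PySem.Int.floordiv n 10 = n / 10 := PySem.Int.floordiv_eq_ediv_of_pos (by omega)
    have h2 : ¬ PySem.Int.floordiv n 10 > 0 := by rw [hd]; omega
    rw [pydigits, dif_neg h, checkLoop, dif_neg h2]
    norm_num
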